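-- pv_equiv track=rewrite | github.com/Rohanc0412/ResearchOps-Studio | backend/data/db/session.py | _async_url
-- ===== SOURCE A (Python) =====
-- def _async_url(url: str) -> str:
--     """Rewrite a sync postgres driver URL to use asyncpg."""
--     for sync_driver in (
--         "postgresql+psycopg2://",
--         "postgresql+psycopg://",
--         "postgresql://",
--     ):
--         if url.startswith(sync_driver):
--             return "postgresql+asyncpg://" + url[len(sync_driver):]
--     return url
-- ===== SOURCE B (Python) =====
-- def _async_url(url: str) -> str:
--     """Rewrite a sync postgres driver URL to use asyncpg."""
--     scheme, sep, rest = url.partition("://")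
--     if sep and scheme in ("postgresql+psycopg2", "postgresql+psycopg", "postgresql"):
--         return "postgresql+asyncpg://" + rest
--     return url
-- ===== Notes on version B (the rewrite author's own statement) =====
-- stated objective: simpler
-- what changed: Replaces the loop over three full driver prefixes (per-prefix startswith and length-based slicing) by a single partition of the URL at its first scheme separator followed by one membership test of the scheme.
import Mathlib
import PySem

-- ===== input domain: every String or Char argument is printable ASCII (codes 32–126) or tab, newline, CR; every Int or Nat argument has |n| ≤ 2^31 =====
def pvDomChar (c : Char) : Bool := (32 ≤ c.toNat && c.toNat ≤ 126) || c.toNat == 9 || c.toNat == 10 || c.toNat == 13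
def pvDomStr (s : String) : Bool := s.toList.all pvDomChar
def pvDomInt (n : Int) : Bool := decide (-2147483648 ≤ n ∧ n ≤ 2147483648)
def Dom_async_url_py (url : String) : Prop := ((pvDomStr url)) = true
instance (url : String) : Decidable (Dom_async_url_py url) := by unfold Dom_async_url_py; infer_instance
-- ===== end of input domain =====

-- B replaces A's loop over three full driver prefixes by a single partition at the
-- first "://" plus one membership test of the scheme (objective: simpler).

-- ===== PORT A =====
def async_url_py (url : String) : String :=
  if PySem.Str.startswith url "postgresql+psycopg2://" then
    String.ofList ("postgresql+asyncpg://".toList ++ PySem.List.slice url.toList (some 22) none)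
  else if PySem.Str.startswith url "postgresql+psycopg://" then
    String.ofList ("postgresql+asyncpg://".toList ++ PySem.List.slice url.toList (some 21) none)
  else if PySem.Str.startswith url "postgresql://" then
    String.ofList ("postgresql+asyncpg://".toList ++ PySem.List.slice url.toList (some 13) none)
  else url

-- ===== PORT B =====
-- hand port of str.partition("://") on the code-point list (PySem has no partition):
-- scan left to right for the FIRST position where ':','/','/' starts; some (before, after)
-- splits around that first occurrence (= Python's partition when the separator occurs),
-- none = separator absent (Python returns (url, '', '') there, i.e. empty sep). Exact.
def pvPart3 (acc : List Char) : List Char → Option (List Char × List Char)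
  | [] => none
  | c :: rest =>
      if c :: rest.take 2 = [':', '/', '/'] then some (acc.reverse, rest.drop 2)
      else pvPart3 (c :: acc) rest

def async_url_py_alt (url : String) : String :=
  match pvPart3 [] url.toList with
  | some (scheme, rest) =>
      if scheme = "postgresql+psycopg2".toList ∨ scheme = "postgresql+psycopg".toList
          ∨ scheme = "postgresql".toList then
        String.ofList ("postgresql+asyncpg://".toList ++ rest)
      else url
  | none => url

-- ===== PRECONDITION & SPEC =====
def Spec_async_url_py (url : String) (out : String) : Prop := out = async_url_py_alt url
instance (url : String) (out : String) : Decidable (Spec_async_url_py url out) := by unfold Spec_async_url_py; infer_instance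

-- ===== CLAIM (what is proved, stated in full; the proofs are below) =====
def Claim_equal_async_url_py : Prop := ∀ (url : String), Dom_async_url_py url → Spec_async_url_py url (async_url_py url)

-- ===== LEMMAS AND PROOFS =====

-- the scan splits a string around a separator occurrence it reports
lemma pvPart3_sound : ∀ (l acc a b : List Char), pvPart3 acc l = some (a, b) →
    a ++ ':' :: '/' :: '/' :: b = acc.reverse ++ l := by
  intro l
  induction l with
  | nil => intro acc a b h; simp [pvPart3] at h
  | cons c rest ih =>
    intro acc a b h
    unfold pvPart3 at h
    split_ifs at h with hc
    · obtain ⟨hc1, hc2⟩ : c = ':' ∧ rest.take 2 = ['/', '/'] := by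
        simpa using hc
      obtain ⟨ha, hb⟩ : acc.reverse = a ∧ rest.drop 2 = b := by
        simpa using h
      have hr : rest = '/' :: '/' :: rest.drop 2 := by
        conv_lhs => rw [← List.take_append_drop 2 rest]
        rw [hc2]; rfl
      subst ha hc1; rw [← hb, hr]; simp
    · have := ih (c :: acc) a b h
      simpa [List.append_assoc] using this

-- the scan on a string starting with each sync prefix (first "://" is the one in the prefix)
lemma pvPart3_p2 (t : List Char) :
    pvPart3 [] ("postgresql+psycopg2://".toList ++ t) = some ("postgresql+psycopg2".toList, t) := by rfl
lemma pvPart3_p1 (t : List Char) :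
    pvPart3 [] ("postgresql+psycopg://".toList ++ t) = some ("postgresql+psycopg".toList, t) := by rfl
lemma pvPart3_pg (t : List Char) :
    pvPart3 [] ("postgresql://".toList ++ t) = some ("postgresql".toList, t) := by rfl

lemma drop22 (t : List Char) :
    PySem.List.slice ("postgresql+psycopg2://".toList ++ t) (some 22) none = t := by
  rw [PySem.List.slice_from _ (by norm_num)]; rfl
lemma drop21 (t : List Char) :
    PySem.List.slice ("postgresql+psycopg://".toList ++ t) (some 21) none = t := by
  rw [PySem.List.slice_from _ (by norm_num)]; rfl
lemma drop13 (t : List Char) :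
    PySem.List.slice ("postgresql://".toList ++ t) (some 13) none = t := by
  rw [PySem.List.slice_from _ (by norm_num)]; rfl

-- ===== VERDICT (by name: the statement is the Claim_ definition above) =====
theorem async_url_py_spec : Claim_equal_async_url_py := by
  intro url _
  unfold Spec_async_url_py async_url_py async_url_py_alt
  simp only [PySem.Str.startswith_eq]
  by_cases h1 : PySem.Chars.startswith url.toList "postgresql+psycopg2://".toList = true
  · obtain ⟨t, ht⟩ : "postgresql+psycopg2://".toList <+: url.toList :=
      (PySem.Chars.startswith_iff _ _).mp h1
    simp only [← ht] at h1 ⊢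
    rw [if_pos h1, pvPart3_p2, drop22]
    simp
  · by_cases h2 : PySem.Chars.startswith url.toList "postgresql+psycopg://".toList = true
    · obtain ⟨t, ht⟩ : "postgresql+psycopg://".toList <+: url.toList :=
        (PySem.Chars.startswith_iff _ _).mp h2
      simp only [← ht] at h1 h2 ⊢
      rw [if_neg h1, if_pos h2, pvPart3_p1, drop21]
      simp
    · by_cases h3 : PySem.Chars.startswith url.toList "postgresql://".toList = true
      · obtain ⟨t, ht⟩ : "postgresql://".toList <+: url.toList :=
          (PySem.Chars.startswith_iff _ _).mp h3
        simp only [← ht] at h1 h2 h3 ⊢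
        rw [if_neg h1, if_neg h2, if_pos h3, pvPart3_pg, drop13]
        simp
      · -- A returns url; show B does too
        rw [if_neg h1, if_neg h2, if_neg h3]
        rcases hpp : pvPart3 [] url.toList with _ | ⟨a, b⟩
        · rfl
        · have hsound := pvPart3_sound url.toList [] a b hpp
          simp only [List.reverse_nil, List.nil_append] at hsound
          have hcond : ¬ (a = "postgresql+psycopg2".toList ∨ a = "postgresql+psycopg".toList
              ∨ a = "postgresql".toList) := by
            rintro (rfl | rfl | rfl)
            · exact h1 ((PySem.Chars.startswith_iff _ _).mpr ⟨b, by rw [← hsound]; rfl⟩)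
            · exact h2 ((PySem.Chars.startswith_iff _ _).mpr ⟨b, by rw [← hsound]; rfl⟩)
            · exact h3 ((PySem.Chars.startswith_iff _ _).mpr ⟨b, by rw [← hsound]; rfl⟩)
          exact (if_neg hcond).symm
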